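-- pv_equiv track=rewrite | github.com/koblosistvan/fakt2023 | Aranyosi Milán/Komal/november/Komal_I603.py | szetszedes
-- ===== SOURCE A (Python) =====
-- def nullaeleje(szam):
--     if szam[0] == '0' and szam != '0':
--         return False
--     else:
--         return True
--
-- def szetszedes(szam):
--     x = []
--     for szamjegy in range(len(szam)):
--         for a in range(szamjegy + 1, len(szam) + 1):
--             s = szam[szamjegy:a]
--             if nullaeleje(s):
--                 x.append(int(s))
--     return x
-- ===== SOURCE B (Python) =====
-- def szetszedes(szam):
--     x = []
--     for i in range(len(szam)):
--         if szam[i] == '0':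
--             # longer substrings from this start have a leading zero; only the single digit counts
--             x.append(0)
--             continue
--         s = ''
--         for j in range(i, len(szam)):
--             s += szam[j]
--             x.append(int(s))
--     return x
-- ===== Notes on version B (the rewrite author's own statement) =====
-- stated objective: alternative
-- what changed: B drops the slice-every-substring-and-filter scheme (helper predicate nullaeleje over szam[i:j] for every pair i<j): it decomposes by start position, emits the single value zero for a zero start digit and skips that inner loop entirely, and otherwise grows the substring incrementally with one append per step instead of re-slicing.
import Mathlib
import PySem

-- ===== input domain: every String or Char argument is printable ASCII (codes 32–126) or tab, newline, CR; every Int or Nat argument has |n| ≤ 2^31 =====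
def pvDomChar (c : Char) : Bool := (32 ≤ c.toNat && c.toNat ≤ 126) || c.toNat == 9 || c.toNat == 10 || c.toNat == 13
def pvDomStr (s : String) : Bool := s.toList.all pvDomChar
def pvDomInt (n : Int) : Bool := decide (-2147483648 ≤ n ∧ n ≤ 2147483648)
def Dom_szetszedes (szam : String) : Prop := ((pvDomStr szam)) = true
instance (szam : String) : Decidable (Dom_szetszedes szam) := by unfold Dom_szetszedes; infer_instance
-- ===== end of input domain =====

-- B replaces A's slice-every-substring-and-filter scheme by a per-start decomposition: a zero start
-- digit contributes one zero value (its inner loop is skipped), any other start grows its substring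
-- incrementally; objective: alternative decomposition (no predicate helper, no filtering, no re-slicing).

-- ===== PORT A =====
def nullaeleje (szam : String) : Bool :=
  -- szam[0] == '0' and szam != '0'  (szam is never empty at the call sites reached)
  if PySem.Str.pyGet? szam 0 = some '0' ∧ szam ≠ "0" then false else true

def szetszedes (szam : String) : List Int :=
  (PySem.List.pyRange 0 (PySem.Str.len szam) 1).foldl
    (fun x szamjegy =>
      (PySem.List.pyRange (szamjegy + 1) (PySem.Str.len szam + 1) 1).foldl
        (fun x a =>
          let s := PySem.Str.slice szam (some szamjegy) (some a)
          -- int(s): Python raises ValueError when s is no numeral (then ofStr? = none);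
          -- such inputs are excluded by Pre_szetszedes, the default is never used there
          if nullaeleje s then x ++ [(PySem.Int.ofStr? s).getD 0] else x)
        x)
    []

-- ===== PORT B =====
def szetszedes_alt (szam : String) : List Int :=
  (PySem.List.pyRange 0 (PySem.Str.len szam) 1).foldl
    (fun x i =>
      if PySem.Str.pyGet? szam i = some '0' then x ++ [(0 : Int)]
      else
        -- s = ''; for j in range(i, len(szam)): s += szam[j]; x.append(int(s))
        -- (the accumulated string s is carried on code points; int(s) = ofChars? s,
        --  none = ValueError, never hit inside Pre_; szam[j] is always in range here)
        ((PySem.List.pyRange i (PySem.Str.len szam) 1).foldl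
            (fun p j =>
              let s := p.2 ++ [PySem.List.pyGetD szam.toList j ' ']
              (p.1 ++ [(PySem.Int.ofChars? s).getD 0], s))
            (x, ([] : List Char))).1)
    []

-- ===== PRECONDITION & SPEC =====
-- Pre_ excludes exactly the inputs on which Python A raises: any character that is not an ASCII
-- digit occurs as a one-character substring, and int() raises ValueError on it.
def Pre_szetszedes (szam : String) : Prop := szam.toList.all Char.isDigit = true
instance (szam : String) : Decidable (Pre_szetszedes szam) := by unfold Pre_szetszedes; infer_instance
def pvWitness_szetszedes : String := "1030"

def Spec_szetszedes (szam : String) (out : List Int) : Prop := out = szetszedes_alt szam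
instance (szam : String) (out : List Int) : Decidable (Spec_szetszedes szam out) := by unfold Spec_szetszedes; infer_instance

-- ===== CLAIM (what is proved, stated in full; the proofs are below) =====
def Claim_equal_szetszedes : Prop := ∀ (szam : String), Dom_szetszedes szam → Pre_szetszedes szam → Spec_szetszedes szam (szetszedes szam)

-- ===== LEMMAS AND PROOFS =====

-- the list of int values contributed by start position i, shared normal form of both ports
def pvSubVals (l : List Char) (i : Nat) : List Int :=
  (List.range (l.length - i)).map (fun k => (PySem.Int.ofChars? ((l.drop i).take (k+1))).getD 0)

def pvG (l : List Char) (i : Nat) : List Int :=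
  if l.getD i ' ' = '0' then [0] else pvSubVals l i

theorem pv_foldl_fixed {α β : Type} (l : List α) (x : β) :
    List.foldl (fun acc _ => acc) x l = x := by
  induction l generalizing x with
  | nil => rfl
  | cons a l ih => simp only [List.foldl_cons]; exact ih x

theorem pv_ofStr_toList (s : String) :
    PySem.Int.ofStr? s = PySem.Int.ofChars? s.toList := by
  rw [← PySem.Int.ofStr?_ofList, String.ofList_toList]

theorem pv_slice_toList (szam : String) (i a : Nat) :
    (PySem.Str.slice szam (some (i : Int)) (some (a : Int))).toList
      = (szam.toList.drop i).take (a - i) := by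
  simp [PySem.Str.toList_slice, PySem.Chars.slice_eq_listSlice, PySem.List.slice_natCast]

theorem pv_pyGet_zero (s : String) : PySem.Str.pyGet? s 0 = s.toList[0]? := by
  simpa using PySem.Str.pyGet?_natCast s 0

theorem pv_nullaeleje_of_head_ne {s : String} (h : s.toList[0]? ≠ some '0') :
    nullaeleje s = true := by
  rw [nullaeleje, if_neg]
  rintro ⟨h0, -⟩
  exact h (by rw [← pv_pyGet_zero]; exact h0)

theorem pv_nullaeleje_zero {s : String} (h : s.toList = ['0']) :
    nullaeleje s = true := by
  have hs : s = "0" := by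
    have := congrArg String.ofList h
    simpa [String.ofList_toList] using this
  subst hs; decide

theorem pv_nullaeleje_false {s : String} (h0 : s.toList[0]? = some '0')
    (hne : s.toList ≠ ['0']) : nullaeleje s = false := by
  rw [nullaeleje, if_pos]
  refine ⟨by rw [pv_pyGet_zero]; exact h0, ?_⟩
  intro h; exact hne (by simp [h])

-- B's inner loop: incremental substring accumulation produces pvSubVals
theorem pv_bfold (l : List Char) (i : Nat) :
    ∀ (m : Nat), i + m ≤ l.length → ∀ (x : List Int),
    (List.range m).foldl
      (fun (p : List Int × List Char) (k : Nat) =>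
        (p.1 ++ [(PySem.Int.ofChars? (p.2 ++ [PySem.List.pyGetD l ((i : Int) + (k : Int)) ' '])).getD 0],
         p.2 ++ [PySem.List.pyGetD l ((i : Int) + (k : Int)) ' ']))
      (x, ([] : List Char))
    = (x ++ (List.range m).map (fun k => (PySem.Int.ofChars? ((l.drop i).take (k+1))).getD 0),
       (l.drop i).take m) := by
  intro m
  induction m with
  | zero => intro _ x; simp
  | succ m ih =>
    intro hm x
    have him : i + m < l.length := by omega
    have hcast : ((i : Int) + (m : Int)) = ((i + m : Nat) : Int) := by push_cast; ring
    have hch : PySem.List.pyGetD l ((i : Int) + (m : Int)) ' ' = l[i + m] := by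
      rw [hcast, PySem.List.pyGetD_natCast, List.getD_eq_getElem l ' ' him]
    have htake : (l.drop i).take m ++ [l[i + m]] = (l.drop i).take (m + 1) := by
      rw [List.take_add_one]
      have hm' : m < (l.drop i).length := by simp; omega
      simp [List.getElem?_eq_getElem hm', List.getElem_drop]
    rw [List.range_succ, List.foldl_append, ih (by omega) x]
    simp only [List.foldl_cons, List.foldl_nil, hch, htake, List.map_append]
    simp

-- the inner loop of A for start i produces pvG
theorem pv_ainner (szam : String) (i : Nat) (hi : i < szam.toList.length) (x : List Int) :
    (PySem.List.pyRange ((i : Int) + 1) ((szam.toList.length : Int) + 1) 1).foldl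
      (fun x a =>
        let s := PySem.Str.slice szam (some (i : Int)) (some a)
        if nullaeleje s then x ++ [(PySem.Int.ofStr? s).getD 0] else x)
      x
    = x ++ pvG szam.toList i := by
  set l := szam.toList with hl
  set n := l.length with hn
  have htake1 : (l.drop i).take 1 = [l[i]] := by
    rw [List.take_one]
    simp [List.head?_eq_getElem?, List.getElem?_drop, List.getElem?_eq_getElem hi]
  by_cases hz : l[i] = '0'
  · -- zero start digit: only the one-character substring survives
    have hlt : ((i : Int) + 1) < ((n : Int) + 1) := by omega
    rw [PySem.List.pyRange_one_cons hlt, List.foldl_cons]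
    have hsl : (PySem.Str.slice szam (some (i : Int)) (some ((i : Int) + 1))).toList = ['0'] := by
      have : ((i : Int) + 1) = ((i + 1 : Nat) : Int) := by push_cast; ring
      rw [this, pv_slice_toList]
      simpa [Nat.add_sub_cancel_left, hz] using htake1
    have hval : (PySem.Int.ofStr? (PySem.Str.slice szam (some (i : Int)) (some ((i : Int) + 1)))).getD 0 = 0 := by
      rw [pv_ofStr_toList, hsl]; decide
    simp only [pv_nullaeleje_zero hsl, if_true, hval]
    rw [PySem.List.foldl_congr_mem _ _ (fun acc _ => acc) _ ?_, pv_foldl_fixed]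
    · have hgd : l.getD i ' ' = '0' := by rw [List.getD_eq_getElem l ' ' hi]; exact hz
      unfold pvG
      rw [if_pos hgd]
    · intro acc a ha
      rw [PySem.List.mem_pyRange_one] at ha
      have ha0 : 0 ≤ a := by omega
      obtain ⟨an, rfl⟩ : ∃ an : Nat, a = (an : Int) := ⟨a.toNat, (Int.toNat_of_nonneg ha0).symm⟩
      have h2 : i + 2 ≤ an := by omega
      have hle : an ≤ n := by omega
      have hsl2 : (PySem.Str.slice szam (some (i : Int)) (some (an : Int))).toList
          = (l.drop i).take (an - i) := pv_slice_toList szam i an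
      have hlen : ((l.drop i).take (an - i)).length = an - i := by
        simp; omega
      have h0 : ((l.drop i).take (an - i))[0]? = some '0' := by
        rw [List.getElem?_take_of_lt (by omega)]
        rw [List.getElem?_drop]
        simpa [List.getElem?_eq_getElem hi] using hz
      have hne : (l.drop i).take (an - i) ≠ ['0'] := by
        intro h; rw [h] at hlen; simp at hlen; omega
      have : nullaeleje (PySem.Str.slice szam (some (i : Int)) (some (an : Int))) = false := by
        apply pv_nullaeleje_false <;> rw [hsl2] <;> assumption
      simp [this]
  · -- nonzero start digit: every substring survives
    rw [PySem.List.foldl_congr_mem _ _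
        (fun acc a => acc ++ [(PySem.Int.ofChars? ((l.drop i).take (a.toNat - i))).getD 0]) _ ?_]
    · rw [PySem.List.foldl_append_singleton_eq_map]
      congr 1
      rw [PySem.List.pyRange_one, List.map_map]
      have harg : (((n : Int) + 1) - ((i : Int) + 1)).toNat = n - i := by omega
      rw [harg]
      unfold pvG pvSubVals
      rw [if_neg (by rw [List.getD_eq_getElem l ' ' hi]; exact hz)]
      apply List.map_congr_left
      intro k _
      have : ((i : Int) + 1 + (k : Int)).toNat - i = k + 1 := by omega
      simp [this]
    · intro acc a ha
      rw [PySem.List.mem_pyRange_one] at ha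
      have ha0 : 0 ≤ a := by omega
      obtain ⟨an, rfl⟩ : ∃ an : Nat, a = (an : Int) := ⟨a.toNat, (Int.toNat_of_nonneg ha0).symm⟩
      have h1 : i + 1 ≤ an := by omega
      have hsl2 : (PySem.Str.slice szam (some (i : Int)) (some (an : Int))).toList
          = (l.drop i).take (an - i) := pv_slice_toList szam i an
      have h0 : ((l.drop i).take (an - i))[0]? = some l[i] := by
        rw [List.getElem?_take_of_lt (by omega), List.getElem?_drop]
        simp [List.getElem?_eq_getElem hi]
      have htrue : nullaeleje (PySem.Str.slice szam (some (i : Int)) (some (an : Int))) = true := by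
        apply pv_nullaeleje_of_head_ne
        rw [hsl2, h0]
        intro h; exact hz (by simpa using h)
      simp only [htrue, if_true, pv_ofStr_toList, hsl2, Int.toNat_natCast]

-- the body of B's outer loop for start i produces pvG
theorem pv_binner (szam : String) (i : Nat) (hi : i < szam.toList.length) (x : List Int) :
    (if PySem.Str.pyGet? szam (i : Int) = some '0' then x ++ [(0 : Int)]
     else
       ((PySem.List.pyRange (i : Int) (szam.toList.length : Int) 1).foldl
          (fun p j =>
            let s := p.2 ++ [PySem.List.pyGetD szam.toList j ' ']
            (p.1 ++ [(PySem.Int.ofChars? s).getD 0], s))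
          (x, ([] : List Char))).1)
    = x ++ pvG szam.toList i := by
  set l := szam.toList with hl
  set n := l.length with hn
  have hget : PySem.Str.pyGet? szam (i : Int) = some l[i] := by
    rw [PySem.Str.pyGet?_natCast]
    exact List.getElem?_eq_getElem hi
  by_cases hz : l[i] = '0'
  · rw [if_pos (by rw [hget, hz])]
    have hgd : l.getD i ' ' = '0' := by rw [List.getD_eq_getElem l ' ' hi]; exact hz
    unfold pvG
    rw [if_pos hgd]
  · rw [if_neg (by rw [hget]; intro h; exact hz (by simpa using h))]
    have hrange : PySem.List.pyRange (i : Int) (n : Int) 1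
        = (List.range (n - i)).map (fun k : Nat => (i : Int) + (k : Int)) := by
      rw [PySem.List.pyRange_one]
      have : ((n : Int) - (i : Int)).toNat = n - i := by omega
      rw [this]
    rw [hrange, List.foldl_map, pv_bfold l i (n - i) (by omega) x]
    unfold pvG pvSubVals
    rw [if_neg (by rw [List.getD_eq_getElem l ' ' hi]; exact hz)]

theorem pv_a_norm (szam : String) :
    szetszedes szam = (List.range szam.toList.length).flatMap (pvG szam.toList) := by
  unfold szetszedes
  rw [PySem.Str.len_eq]
  set l := szam.toList with hl
  set n := l.length with hn
  have hrange : PySem.List.pyRange 0 (n : Int) 1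
      = (List.range n).map (fun k : Nat => (k : Int)) := by
    rw [PySem.List.pyRange_one]
    simp
  rw [hrange, List.foldl_map]
  rw [PySem.List.foldl_congr_mem _ _ (fun x k => x ++ pvG l k) _ ?_]
  · rw [PySem.List.foldl_append_eq_flatMap]
    simp
  · intro acc k hk
    rw [List.mem_range] at hk
    exact pv_ainner szam k hk acc

theorem pv_b_norm (szam : String) :
    szetszedes_alt szam = (List.range szam.toList.length).flatMap (pvG szam.toList) := by
  unfold szetszedes_alt
  rw [PySem.Str.len_eq]
  set l := szam.toList with hl
  set n := l.length with hn
  have hrange : PySem.List.pyRange 0 (n : Int) 1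
      = (List.range n).map (fun k : Nat => (k : Int)) := by
    rw [PySem.List.pyRange_one]
    simp
  rw [hrange, List.foldl_map]
  rw [PySem.List.foldl_congr_mem _ _ (fun x k => x ++ pvG l k) _ ?_]
  · rw [PySem.List.foldl_append_eq_flatMap]
    simp
  · intro acc k hk
    rw [List.mem_range] at hk
    exact pv_binner szam k hk acc

-- ===== VERDICT (by name: the statement is the Claim_ definition above) =====
theorem szetszedes_spec : Claim_equal_szetszedes := by
  intro szam _ _
  unfold Spec_szetszedes
  rw [pv_a_norm, pv_b_norm]
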